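-- pv_equiv track=rewrite | github.com/safeboost1/SAFEboost | benchmark/levelup/utils.py | comp_range_smallest
-- ===== SOURCE A (Python) =====
-- from typing import List, Optional
--
-- def comp_range_smallest(a: int, largest: int, n: int, return_early: bool = False) -> List[int]:
--     """
--     Range Cover[0,a]
--     Args:
--         a: the lower bound of the range (unsigned)
--         largest: the maximum value (unsigned)
--         n: tree height parameter
--         return_early: if True, initializes and returns the array immediately
--     Returns:
--         A list `range_arr` of length n+1, where each entry is either
--         largest+1 (default) or a computed value at certain indices.
--     """
--     range_arr = [largest + 1] * (n + 1)
--     if return_early: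
--         return range_arr
--     exponents: List[int] = []
--     powers_sum = 0
--     while (a + 1) - powers_sum != 0:
--         i = a - powers_sum
--         j = 0
--         while (1 << j) - 1 <= i:
--             j += 1
--         j -= 1
--         value = sum(1 << (k - j) for k in exponents)
--         range_arr[j] = value
--         exponents.append(j)
--         powers_sum = sum(1 << q for q in exponents)
--     for i, x in enumerate(range_arr):
--         if x == largest + 1:
--             range_arr[i] = None
--     return range_arr
-- ===== SOURCE B (Python) =====
-- def comp_range_smallest(a, largest, n, return_early=False):
--     default = largest + 1
--     if return_early:
--         return [default] * (n + 1)
--     out = [None] * (n + 1)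
--     m = a + 1
--     j = 0
--     while m > 0:
--         if m & 1 and j <= n:
--             v = ((a + 1) >> j) - 1
--             if v != default:
--                 out[j] = v
--         m >>= 1
--         j += 1
--     return out
-- ===== Notes on version B (the rewrite author's own statement) =====
-- stated objective: alternative
-- what changed: Replace the greedy decomposition while-loop (inner linear scan for the top bit, exponent list re-summed twice per iteration) and the final whole-array replacement pass by a bulk [None]*(n+1) allocation plus one walk over the bits of a+1 that writes (m>>j)-1 only at the set-bit positions.
import Mathlib
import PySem

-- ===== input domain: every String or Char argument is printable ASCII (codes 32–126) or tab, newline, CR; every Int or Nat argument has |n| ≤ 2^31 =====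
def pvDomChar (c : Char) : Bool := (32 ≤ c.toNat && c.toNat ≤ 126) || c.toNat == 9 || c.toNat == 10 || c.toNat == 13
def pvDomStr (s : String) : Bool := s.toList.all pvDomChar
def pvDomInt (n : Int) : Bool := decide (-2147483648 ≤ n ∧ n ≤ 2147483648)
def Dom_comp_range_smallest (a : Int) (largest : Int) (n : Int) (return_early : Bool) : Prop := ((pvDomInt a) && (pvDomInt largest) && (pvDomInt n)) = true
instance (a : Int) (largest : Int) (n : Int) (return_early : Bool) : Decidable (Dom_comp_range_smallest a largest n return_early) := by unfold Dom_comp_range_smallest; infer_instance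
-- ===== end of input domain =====

-- B replaces A's greedy decomposition loop (inner top-bit scan, exponent list re-summed
-- each iteration) and A's whole-array replacement pass by a bulk None allocation plus one
-- walk over the bits of a+1 writing only the set-bit positions.


-- ===== PORT A =====
-- inner loop 'while (1 << j) - 1 <= i: j += 1' followed by 'j -= 1'; the fuel only makes
-- the loop total (inside Pre_ the fuel i.toNat + 2 is proved sufficient)
def crsInner (i : Int) (j : Nat) (fuel : Nat) : Int :=
  match fuel with
  | 0 => (j : Int) - 1
  | fuel + 1 => if (2 : Int) ^ j - 1 ≤ i then crsInner i (j + 1) fuel else (j : Int) - 1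

-- outer 'while (a + 1) - powers_sum != 0' loop over the state (range_arr, exponents,
-- powers_sum); the fuel only makes the loop total; 'range_arr[j] = value' is List.set at
-- j.toNat, exact inside Pre_ (there 0 ≤ j < length; outside Pre_ Python raises)
def crsLoop (a : Int) (fuel : Nat) (range_arr : List Int) (exponents : List Int) (powers_sum : Int) : List Int :=
  match fuel with
  | 0 => range_arr
  | fuel + 1 =>
    if (a + 1) - powers_sum = 0 then range_arr
    else
      let i := a - powers_sum
      let j := crsInner i 0 (i.toNat + 2)
      let value := (exponents.map (fun k => (2 : Int) ^ (k - j).toNat)).sum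
      let range_arr' := range_arr.set j.toNat value
      let exponents' := exponents ++ [j]
      let powers_sum' := (exponents'.map (fun q => (2 : Int) ^ q.toNat)).sum
      crsLoop a fuel range_arr' exponents' powers_sum'

def comp_range_smallest (a : Int) (largest : Int) (n : Int) (return_early : Bool) : List (Option Int) :=
  let range_arr : List Int := List.replicate (n + 1).toNat (largest + 1)
  if return_early then range_arr.map some
  else
    let res := crsLoop a ((a + 1).toNat + 1) range_arr [] 0
    res.map (fun x => if x = largest + 1 then none else some x)

-- ===== PORT B =====
def altLoop (a : Int) (default : Int) (n : Int) (out : List (Option Int)) (m : Int) (j : Nat) (fuel : Nat) : List (Option Int) :=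
  match fuel with
  | 0 => out
  | fuel + 1 =>
    if 0 < m then
      let out' :=
        if PySem.Int.band m 1 ≠ 0 ∧ (j : Int) ≤ n then
          let v := PySem.Int.floordiv (a + 1) ((2 : Int) ^ j) - 1
          if v ≠ default then out.set j (some v) else out
        else out
      altLoop a default n out' (m >>> (1 : Int)) (j + 1) fuel
    else out

def comp_range_smallest_alt (a : Int) (largest : Int) (n : Int) (return_early : Bool) : List (Option Int) :=
  let default := largest + 1
  if return_early then (List.replicate (n + 1).toNat default).map some
  else altLoop a default n (List.replicate (n + 1).toNat none) (a + 1) 0 ((a + 1).toNat + 1)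

-- ===== PRECONDITION & SPEC =====
-- Unless return_early is set, Python A raises for a ≤ -2 (ValueError: negative shift
-- count) and for a + 1 ≥ 2^(n+1) (IndexError: a bit index of a+1 exceeds n); exactly
-- those inputs are excluded.
def Pre_comp_range_smallest (a : Int) (largest : Int) (n : Int) (return_early : Bool) : Prop :=
  return_early = true ∨ (-1 ≤ a ∧ a + 1 < 2 ^ (n + 1).toNat)
instance (a : Int) (largest : Int) (n : Int) (return_early : Bool) : Decidable (Pre_comp_range_smallest a largest n return_early) := by unfold Pre_comp_range_smallest; infer_instance

def pvWitness_comp_range_smallest : Int × Int × Int × Bool := (5, 10, 3, false)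

def Spec_comp_range_smallest (a : Int) (largest : Int) (n : Int) (return_early : Bool) (out : List (Option Int)) : Prop := out = comp_range_smallest_alt a largest n return_early
instance (a : Int) (largest : Int) (n : Int) (return_early : Bool) (out : List (Option Int)) : Decidable (Spec_comp_range_smallest a largest n return_early out) := by unfold Spec_comp_range_smallest; infer_instance

-- ===== CLAIM (what is proved, stated in full; the proofs are below) =====
def Claim_equal_comp_range_smallest : Prop := ∀ (a : Int) (largest : Int) (n : Int) (return_early : Bool), Dom_comp_range_smallest a largest n return_early → Pre_comp_range_smallest a largest n return_early → Spec_comp_range_smallest a largest n return_early (comp_range_smallest a largest n return_early)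

-- ===== LEMMAS AND PROOFS =====

-- the array after A has assigned every set bit of m below threshold t
def mergeArr (m : Nat) (t : Nat) (arr : List Int) : List Int :=
  arr.mapIdx (fun idx x => if idx < t ∧ m.testBit idx then ((m / 2 ^ idx : Nat) : Int) - 1 else x)

lemma inner_eq (r : Nat) (hr : 1 ≤ r) :
    ∀ (fuel j : Nat), j ≤ Nat.log 2 r + 1 → Nat.log 2 r + 2 ≤ fuel + j →
      crsInner ((r : Int) - 1) j fuel = (Nat.log 2 r : Int) := by
  intro fuel
  induction fuel with
  | zero => intro j h1 h2; omega
  | succ fuel ih =>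
    intro j h1 h2
    have hiff : ((2 : Int) ^ j - 1 ≤ (r : Int) - 1) ↔ j ≤ Nat.log 2 r := by
      rw [show ((2:Int)^j - 1 ≤ (r:Int) - 1) ↔ ((2:Int)^j ≤ (r:Int)) by omega,
          show ((2:Int)^j ≤ (r:Int)) ↔ (2^j ≤ r) from by exact_mod_cast Iff.rfl]
      exact (Nat.le_log_iff_pow_le (by norm_num) (by omega)).symm
    simp only [crsInner]
    by_cases hj : j ≤ Nat.log 2 r
    · rw [if_pos (hiff.mpr hj)]
      exact ih (j + 1) (by omega) (by omega)
    · rw [if_neg (fun h => hj (hiff.mp h))]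
      have : j = Nat.log 2 r + 1 := by omega
      omega

lemma merge_exit (m t : Nat) (arr : List Int) (h : m % 2 ^ t = 0) :
    mergeArr m t arr = arr := by
  apply List.ext_getElem (by simp [mergeArr])
  intro idx h1 h2
  simp only [mergeArr, List.getElem_mapIdx]
  rw [if_neg]
  rintro ⟨hlt, hbit⟩
  have h2' := Nat.testBit_mod_two_pow m t idx
  rw [h] at h2'
  simp [hlt, hbit] at h2'

lemma merge_step (m t L : Nat) (arr : List Int)
    (hLt : L < t) (hbit : m.testBit L = true)
    (hhi : ∀ idx, L < idx → idx < t → m.testBit idx = false) :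
    mergeArr m t arr = mergeArr m L (arr.set L (((m / 2 ^ L : Nat) : Int) - 1)) := by
  apply List.ext_getElem (by simp [mergeArr])
  intro idx h1 h2
  simp only [mergeArr, List.getElem_mapIdx, List.getElem_set]
  rcases lt_trichotomy idx L with h | h | h
  · have hne : L ≠ idx := by omega
    simp [h, Nat.lt_trans h hLt, hne]
  · subst h
    simp [hLt, hbit]
  · have hne : L ≠ idx := by omega
    by_cases hidx : idx < t
    · simp [hhi idx h hidx, hne, Nat.lt_asymm h]
    · have : ¬ idx < t := hidx
      simp [this, hne, Nat.lt_asymm h]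

lemma sum_shift (L : Nat) (exps : List Int) (hk : ∀ k ∈ exps, (L : Int) ≤ k) :
    (exps.map (fun k => (2 : Int) ^ (k - (L : Int)).toNat)).sum * 2 ^ L
      = (exps.map (fun q => (2 : Int) ^ q.toNat)).sum := by
  induction exps with
  | nil => simp
  | cons x xs ih =>
    have hx : (L : Int) ≤ x := hk x (List.mem_cons_self)
    have hxs := ih (fun k hkmem => hk k (List.mem_cons_of_mem _ hkmem))
    simp only [List.map_cons, List.sum_cons, add_mul, hxs]
    congr 1
    rw [← pow_add]
    congr 1
    omega

lemma loop_eq (a : Int) (ha : -1 ≤ a) :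
    ∀ (fuel t : Nat) (arr : List Int) (exps : List Int),
      t + 1 ≤ fuel →
      (∀ k ∈ exps, (t : Int) ≤ k) →
      (exps.map (fun q => (2 : Int) ^ q.toNat)).sum = (a + 1) - (((a + 1).toNat % 2 ^ t : Nat) : Int) →
      crsLoop a fuel arr exps ((a + 1) - (((a + 1).toNat % 2 ^ t : Nat) : Int)) = mergeArr (a + 1).toNat t arr := by
  intro fuel
  induction fuel with
  | zero => intro t arr exps h; omega
  | succ fuel ih =>
    intro t arr exps hfuel hexps hsum
    have hma : (((a + 1).toNat : Nat) : Int) = a + 1 := by omega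
    set m := (a + 1).toNat with hm
    set r := m % 2 ^ t with hrdef
    by_cases hr0 : r = 0
    · simp only [crsLoop, hr0]
      rw [if_pos (by push_cast; ring), merge_exit m t arr (by rw [← hrdef, hr0])]
    · have hr1 : 1 ≤ r := by omega
      set L := Nat.log 2 r with hL
      have hL1 : 2 ^ L ≤ r := Nat.pow_log_le_self 2 hr0
      have hL2 : r < 2 ^ (L + 1) := Nat.lt_pow_succ_log_self (by norm_num) r
      have hrt : r < 2 ^ t := Nat.mod_lt _ (Nat.two_pow_pos t)
      have hLt : L < t := by
        by_contra hc
        have : 2 ^ t ≤ 2 ^ L := Nat.pow_le_pow_right (by norm_num) (by omega)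
        omega
      have hm1 : m % 2 ^ (L + 1) = r := by
        have h1 : m % 2 ^ t % 2 ^ (L + 1) = m % 2 ^ (L + 1) :=
          Nat.mod_mod_of_dvd m (pow_dvd_pow 2 (by omega))
        rw [← h1, ← hrdef, Nat.mod_eq_of_lt hL2]
      have hmL : m % 2 ^ L = r - 2 ^ L := by
        have h1 : m % 2 ^ (L + 1) % 2 ^ L = m % 2 ^ L :=
          Nat.mod_mod_of_dvd m (pow_dvd_pow 2 (by omega))
        rw [← h1, hm1, Nat.mod_eq_sub_mod hL1, Nat.mod_eq_of_lt (by
          have : 2 ^ (L + 1) = 2 ^ L * 2 := by ring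
          omega)]
      have hdivL : r / 2 ^ L = 1 := by
        apply Nat.div_eq_of_lt_le (by omega)
        have : 2 ^ (L + 1) = 2 ^ L * 2 := by ring
        omega
      have hbitL : m.testBit L = true := by
        have h1 := Nat.testBit_mod_two_pow m (L + 1) L
        rw [hm1] at h1
        simp only [Nat.lt_succ_self, decide_true, Bool.true_and] at h1
        rw [← h1, Nat.testBit_eq_decide_div_mod_eq, hdivL]
        simp
      have hhi : ∀ idx, L < idx → idx < t → m.testBit idx = false := by
        intro idx hi1 hi2
        have h1 := Nat.testBit_mod_two_pow m t idx
        rw [← hrdef] at h1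
        have h2 : r.testBit idx = false :=
          Nat.testBit_lt_two_pow (lt_of_lt_of_le hL2 (Nat.pow_le_pow_right (by norm_num) (by omega)))
        simp [hi2, h2] at h1
        simp [h1]
      -- unfold one loop iteration
      simp only [crsLoop]
      rw [if_neg (by omega)]
      have hirw : a - (a + 1 - ((r : Nat) : Int)) = (r : Int) - 1 := by ring
      rw [hirw]
      have hitn : ((r : Int) - 1).toNat = r - 1 := by omega
      rw [hitn]
      have hinner : crsInner ((r : Int) - 1) 0 (r - 1 + 2) = (L : Int) := by
        apply inner_eq r hr1 (r - 1 + 2) 0 (by omega)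
        have : L < r := Nat.log_lt_self 2 hr0
        omega
      rw [hinner]
      -- the assigned value
      have hQ : (m : Int) - r = 2 ^ (L + 1) * ((m / 2 ^ (L + 1) : Nat) : Int) := by
        have h1 := Nat.div_add_mod m (2 ^ (L + 1))
        rw [hm1] at h1
        have h4 : ((2 ^ (L + 1) : Nat) : Int) * ((m / 2 ^ (L + 1) : Nat) : Int) = (m : Int) - r := by
          rw [← Nat.cast_mul]
          omega
        have h5 : ((2 ^ (L + 1) : Nat) : Int) = (2 : Int) ^ (L + 1) := by push_cast; ring
        rw [← h4, h5]
      have hval : (exps.map (fun k => (2 : Int) ^ (k - (L : Int)).toNat)).sum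
          = ((m / 2 ^ L : Nat) : Int) - 1 := by
        have h1 := sum_shift L exps (fun k hkm => le_trans (by exact_mod_cast Nat.le_of_lt hLt) (hexps k hkm))
        rw [hsum, ← hma] at h1
        have hdd : m / 2 ^ L = 2 * (m / 2 ^ (L + 1)) + 1 := by
          have h2 := Nat.div_add_mod (m / 2 ^ L) 2
          have h3 : m / 2 ^ L / 2 = m / 2 ^ (L + 1) := by
            rw [Nat.div_div_eq_div_mul, pow_succ]
          have h4 : m / 2 ^ L % 2 = 1 := by
            have h := hbitL
            rw [Nat.testBit_eq_decide_div_mod_eq] at h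
            simpa using h
          omega
        have h5 : ((m : Int) - r) = (exps.map (fun k => (2 : Int) ^ (k - (L : Int)).toNat)).sum * 2 ^ L := h1.symm
        rw [hQ] at h5
        have h2L : (0 : Int) < 2 ^ L := by positivity
        have : (exps.map (fun k => (2 : Int) ^ (k - (L : Int)).toNat)).sum = 2 * ((m / 2 ^ (L + 1) : Nat) : Int) := by
          have hpw : (2 : Int) ^ (L + 1) = 2 ^ L * 2 := by ring
          rw [hpw] at h5
          nlinarith [h5]
        rw [this, hdd]
        push_cast
        ring
      rw [hval]
      -- the new powers_sum
      have hpsum' : ((exps ++ [(L : Int)]).map (fun q => (2 : Int) ^ q.toNat)).sum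
          = (a + 1) - ((m % 2 ^ L : Nat) : Int) := by
        simp only [List.map_append, List.sum_append, List.map_cons, List.map_nil, List.sum_cons,
          List.sum_nil, add_zero, hsum]
        rw [Int.toNat_natCast, hmL, Nat.cast_sub hL1]
        push_cast
        ring
      rw [Int.toNat_natCast, hpsum']
      have hIH := ih L (arr.set L (((m / 2 ^ L : Nat) : Int) - 1)) (exps ++ [(L : Int)])
        (by omega)
        (by
          intro k hk
          rcases List.mem_append.mp hk with h | h
          · exact le_trans (by exact_mod_cast Nat.le_of_lt hLt) (hexps k h)
          · simp at h; omega)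
        hpsum'
      rw [hIH]
      exact (merge_step m t L arr hLt hbitL hhi).symm


-- the array after B has written every set bit of M at index ≥ j
def overlayB (default : Int) (M : Nat) (j : Nat) (out : List (Option Int)) : List (Option Int) :=
  out.mapIdx (fun idx x =>
    if j ≤ idx ∧ M.testBit idx ∧ ((M / 2 ^ idx : Nat) : Int) - 1 ≠ default
    then some (((M / 2 ^ idx : Nat) : Int) - 1) else x)

lemma overlay_step (default : Int) (M j : Nat) (out : List (Option Int)) :
    overlayB default M j out
      = overlayB default M (j + 1)
          (if M.testBit j ∧ ((M / 2 ^ j : Nat) : Int) - 1 ≠ default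
           then out.set j (some (((M / 2 ^ j : Nat) : Int) - 1)) else out) := by
  by_cases hP : M.testBit j ∧ ((M / 2 ^ j : Nat) : Int) - 1 ≠ default
  · rw [if_pos hP]
    apply List.ext_getElem (by simp [overlayB])
    intro idx h1 h2
    have hidxlen : idx < out.length := by simpa [overlayB] using h1
    simp only [overlayB, List.getElem_mapIdx]
    rcases lt_trichotomy idx j with hij | hij | hij
    · rw [if_neg (by rintro ⟨h, -⟩; omega), if_neg (by rintro ⟨h, -⟩; omega)]
      exact (List.getElem_set_ne (by omega) (by simpa using hidxlen)).symm
    · subst hij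
      rw [if_pos ⟨le_refl idx, hP.1, hP.2⟩, if_neg (by rintro ⟨h, -⟩; omega)]
      exact (List.getElem_set_self (by simpa using hidxlen)).symm
    · by_cases houter : M.testBit idx = true ∧ ((M / 2 ^ idx : Nat) : Int) - 1 ≠ default
      · rw [if_pos ⟨by omega, houter.1, houter.2⟩, if_pos ⟨by omega, houter.1, houter.2⟩]
      · rw [if_neg (by rintro ⟨-, hx, hy⟩; exact houter ⟨hx, hy⟩),
            if_neg (by rintro ⟨-, hx, hy⟩; exact houter ⟨hx, hy⟩)]
        exact (List.getElem_set_ne (by omega) (by simpa using hidxlen)).symm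
  · rw [if_neg hP]
    apply List.ext_getElem (by simp [overlayB])
    intro idx h1 h2
    simp only [overlayB, List.getElem_mapIdx]
    rcases lt_trichotomy idx j with hij | hij | hij
    · rw [if_neg (by rintro ⟨h, -⟩; omega), if_neg (by rintro ⟨h, -⟩; omega)]
    · subst hij
      rw [if_neg (by rintro ⟨-, hx, hy⟩; exact hP ⟨hx, hy⟩), if_neg (by rintro ⟨h, -⟩; omega)]
    · by_cases houter : M.testBit idx = true ∧ ((M / 2 ^ idx : Nat) : Int) - 1 ≠ default
      · rw [if_pos ⟨by omega, houter.1, houter.2⟩, if_pos ⟨by omega, houter.1, houter.2⟩]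
      · rw [if_neg (by rintro ⟨-, hx, hy⟩; exact houter ⟨hx, hy⟩),
            if_neg (by rintro ⟨-, hx, hy⟩; exact houter ⟨hx, hy⟩)]

lemma alt_loop_eq (a default n : Int) (ha : -1 ≤ a) :
    ∀ (fuel j : Nat) (out : List (Option Int)),
      out.length = (n + 1).toNat →
      (a + 1).toNat / 2 ^ j + 1 ≤ fuel →
      altLoop a default n out (((a + 1).toNat / 2 ^ j : Nat) : Int) j fuel
        = overlayB default (a + 1).toNat j out := by
  intro fuel
  induction fuel with
  | zero =>
    intro j out hlen hf
    exact absurd hf (Nat.not_succ_le_zero _)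
  | succ fuel ih =>
    intro j out hlen hf
    set M := (a + 1).toNat with hM
    by_cases h0 : M / 2 ^ j = 0
    · simp only [altLoop, h0]
      rw [if_neg (by simp)]
      apply (List.ext_getElem (by simp [overlayB]) ?_).symm
      intro idx h1 h2
      simp only [overlayB, List.getElem_mapIdx]
      rw [if_neg]
      rintro ⟨hj, hbit, -⟩
      have hlt : M < 2 ^ j := (Nat.div_eq_zero_iff_lt (Nat.two_pow_pos j)).mp h0
      have : M < 2 ^ idx := lt_of_lt_of_le hlt (Nat.pow_le_pow_right (by norm_num) hj)
      rw [Nat.testBit_lt_two_pow this] at hbit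
      exact Bool.false_ne_true hbit
    · have hpos : 0 < M / 2 ^ j := Nat.pos_of_ne_zero h0
      simp only [altLoop]
      rw [if_pos (by exact_mod_cast hpos)]
      have hband : PySem.Int.band ((M / 2 ^ j : Nat) : Int) 1 = ((M / 2 ^ j % 2 : Nat) : Int) := by
        rw [PySem.Int.band_one]; exact_mod_cast PySem.Int.mod_natCast (M / 2 ^ j) 2
      have hdd : M / 2 ^ j / 2 = M / 2 ^ (j + 1) := by rw [Nat.div_div_eq_div_mul, pow_succ]
      have hshift : (((M / 2 ^ j : Nat) : Int) >>> (1 : Int)) = ((M / 2 ^ (j + 1) : Nat) : Int) := by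
        simp [← hdd]
        rfl
      have hfd : PySem.Int.floordiv (a + 1) ((2 : Int) ^ j) = ((M / 2 ^ j : Nat) : Int) := by
        rw [show (a + 1) = ((M : Nat) : Int) from by omega,
            show ((2 : Int) ^ j) = ((2 ^ j : Nat) : Int) from by push_cast; ring]
        exact PySem.Int.floordiv_natCast M (2 ^ j)
      rw [hband, hfd, hshift]
      have hlt2 := Nat.div_lt_self hpos (by norm_num : 1 < 2)
      have hmod2 : M / 2 ^ j % 2 = 1 ↔ M.testBit j := by
        rw [Nat.testBit_eq_decide_div_mod_eq]; simp
      -- identify the updated list with the one overlay_step expects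
      have hout' :
          (if ((M / 2 ^ j % 2 : Nat) : Int) ≠ 0 ∧ (j : Int) ≤ n then
            if ((M / 2 ^ j : Nat) : Int) - 1 ≠ default then
              out.set j (some (((M / 2 ^ j : Nat) : Int) - 1)) else out
          else out)
          = (if M.testBit j ∧ ((M / 2 ^ j : Nat) : Int) - 1 ≠ default
             then out.set j (some (((M / 2 ^ j : Nat) : Int) - 1)) else out) := by
        by_cases hbit : M.testBit j
        · have hone : M / 2 ^ j % 2 = 1 := hmod2.mpr hbit
          by_cases hjn : (j : Int) ≤ n
          · simp [hone, hbit, hjn]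
          · have hjlen : out.length ≤ j := by omega
            simp [hjn, hbit, List.set_eq_of_length_le hjlen]
        · have hzero : M / 2 ^ j % 2 = 0 := by
            rcases Nat.mod_two_eq_zero_or_one (M / 2 ^ j) with h | h
            · exact h
            · exact absurd (hmod2.mp h) hbit
          simp [hzero, hbit]
      rw [hout']
      rw [ih (j + 1) _ (by split_ifs <;> simp [hlen]) (by rw [← hdd]; omega)]
      exact (overlay_step default M j out).symm

lemma crs_eq_alt (a largest n : Int) (return_early : Bool)
    (hPre : Pre_comp_range_smallest a largest n return_early) :
    comp_range_smallest a largest n return_early = comp_range_smallest_alt a largest n return_early := by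
  rcases hPre with h | ⟨ha, _hlt⟩
  · subst h; rfl
  · cases return_early with
    | true => rfl
    | false =>
      simp only [comp_range_smallest, comp_range_smallest_alt, if_neg Bool.false_ne_true]
      set m := (a + 1).toNat with hm
      have hma : ((m : Nat) : Int) = a + 1 := by omega
      set N := (n + 1).toNat with hN
      have hcrs : crsLoop a (m + 1) (List.replicate N (largest + 1)) [] 0
          = mergeArr m m (List.replicate N (largest + 1)) := by
        have hmod : m % 2 ^ m = m := Nat.mod_eq_of_lt Nat.lt_two_pow_self
        have h0 : (0 : Int) = (a + 1) - ((m % 2 ^ m : Nat) : Int) := by rw [hmod]; omega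
        rw [h0]
        exact loop_eq a ha (m + 1) m _ [] (le_refl _) (by simp) (by rw [hmod]; simp; omega)
      have halt : altLoop a (largest + 1) n (List.replicate N none) (a + 1) 0 (m + 1)
          = overlayB (largest + 1) m 0 (List.replicate N none) := by
        have h00 : (a + 1) = ((m / 2 ^ 0 : Nat) : Int) := by rw [pow_zero, Nat.div_one]; omega
        rw [h00]
        exact alt_loop_eq a (largest + 1) n ha (m + 1) 0 _ (by simp [hN])
          (by rw [pow_zero, Nat.div_one])
      rw [hcrs, halt]
      apply List.ext_getElem (by simp [mergeArr, overlayB])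
      intro idx h1 h2
      simp only [mergeArr, overlayB, List.getElem_map, List.getElem_mapIdx,
        List.getElem_replicate]
      by_cases hc : m.testBit idx
      · have hidxm : idx < m := by
          have hge : 2 ^ idx ≤ m := Nat.ge_two_pow_of_testBit hc
          have hlt : idx < 2 ^ idx := Nat.lt_two_pow_self
          omega
        rw [if_pos (show idx < m ∧ m.testBit idx = true from ⟨hidxm, hc⟩)]
        by_cases hv : ((m / 2 ^ idx : Nat) : Int) - 1 = largest + 1
        · rw [if_pos hv, if_neg (show ¬(0 ≤ idx ∧ m.testBit idx = true ∧
              ((m / 2 ^ idx : Nat) : Int) - 1 ≠ largest + 1) from by rintro ⟨-, -, h⟩; exact h hv)]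
        · rw [if_neg hv, if_pos (show 0 ≤ idx ∧ m.testBit idx = true ∧
              ((m / 2 ^ idx : Nat) : Int) - 1 ≠ largest + 1 from ⟨Nat.zero_le idx, hc, hv⟩)]
      · rw [if_neg (show ¬(idx < m ∧ m.testBit idx = true) from by rintro ⟨-, h⟩; exact hc h),
            if_neg (show ¬(0 ≤ idx ∧ m.testBit idx = true ∧
              ((m / 2 ^ idx : Nat) : Int) - 1 ≠ largest + 1) from by rintro ⟨-, h, -⟩; exact hc h)]
        simp

-- ===== VERDICT (by name: the statement is the Claim_ definition above) =====
theorem comp_range_smallest_spec : Claim_equal_comp_range_smallest := by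
  intro a largest n return_early _hDom hPre
  unfold Spec_comp_range_smallest
  exact crs_eq_alt a largest n return_early hPre
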